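-- pv_equiv track=rewrite | github.com/Quratulain-shah/AI-Employee-FTE | linkedin_watcher.py | analyze_comments
-- ===== SOURCE A (Python) =====
-- from typing import Dict, List, Optional, Any
--
-- def analyze_comments(comments: List[str]) -> Dict[str, Any]:
--     """
--     Analyze comments for sentiment and keywords
--     """
--     sentiment_analysis = {
--         'positive': 0,
--         'negative': 0,
--         'neutral': 0,
--         'total': len(comments)
--     }
--
--     keyword_mentions = {}
--
--     for comment in comments:
--         # Simple sentiment analysis
--         positive_words = ['great', 'excellent', 'amazing', 'love', 'perfect', 'good', 'awesome']
--         negative_words = ['bad', 'terrible', 'awful', 'hate', 'worst', 'poor', 'disappointed']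
--
--         comment_lower = comment.lower()
--         has_positive = any(word in comment_lower for word in positive_words)
--         has_negative = any(word in comment_lower for word in negative_words)
--
--         if has_positive and not has_negative:
--             sentiment_analysis['positive'] += 1
--         elif has_negative and not has_positive:
--             sentiment_analysis['negative'] += 1
--         else:
--             sentiment_analysis['neutral'] += 1
--
--     return sentiment_analysis
-- ===== SOURCE B (Python) =====
-- from typing import Dict, List, Any
--
-- _POS = ['great', 'excellent', 'amazing', 'love', 'perfect', 'good', 'awesome']
-- _NEG = ['bad', 'terrible', 'awful', 'hate', 'worst', 'poor', 'disappointed']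
--
--
-- def _classify(text):
--     # One left-to-right scan over the text: at each position test which
--     # keywords begin there, tracking two flags; stop early once both kinds
--     # of keyword have been seen (then the comment is neutral).
--     pos = neg = False
--     for i in range(len(text)):
--         if not pos and any(text.startswith(w, i) for w in _POS):
--             pos = True
--         if not neg and any(text.startswith(w, i) for w in _NEG):
--             neg = True
--         if pos and neg:
--             return 'neutral'
--     if pos:
--         return 'positive'
--     if neg:
--         return 'negative'
--     return 'neutral'
--
--
-- def analyze_comments(comments: List[str]) -> Dict[str, Any]:
--     counts = {'positive': 0, 'negative': 0, 'neutral': 0}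
--     for comment in comments:
--         counts[_classify(comment.lower())] += 1
--     counts['total'] = len(comments)
--     return counts
-- ===== Notes on version B (the rewrite author's own statement) =====
-- stated objective: alternative
-- what changed: Replaces the per-keyword substring-membership tests ('word in comment') by a single left-to-right scan of each lowercased comment that checks at every position which keywords start there (startswith with an offset), tracking two flags with an early exit once both polarities are seen; each comment is reduced to a label that indexes a counter dict, instead of A's if/elif/else branches over two 'any(word in text)' results.
import Mathlib
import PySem

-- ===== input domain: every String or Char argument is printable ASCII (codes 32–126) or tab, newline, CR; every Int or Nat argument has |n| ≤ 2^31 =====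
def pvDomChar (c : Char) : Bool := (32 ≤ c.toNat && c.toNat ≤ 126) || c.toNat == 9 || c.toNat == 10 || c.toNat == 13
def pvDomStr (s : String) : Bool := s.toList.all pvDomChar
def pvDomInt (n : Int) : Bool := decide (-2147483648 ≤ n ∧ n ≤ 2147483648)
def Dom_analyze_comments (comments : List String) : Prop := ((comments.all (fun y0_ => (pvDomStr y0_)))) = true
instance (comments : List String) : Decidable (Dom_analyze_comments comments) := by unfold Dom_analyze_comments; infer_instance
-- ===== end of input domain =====

-- B replaces the per-keyword substring-membership tests by a single positional
-- scan of each lowercased comment (flags + early exit) that yields a label used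
-- to index a counter dict (objective: alternative decomposition).

-- ===== PORT A =====
def pvPositiveWords : List String :=
  ["great", "excellent", "amazing", "love", "perfect", "good", "awesome"]

def pvNegativeWords : List String :=
  ["bad", "terrible", "awful", "hate", "worst", "poor", "disappointed"]

-- the body of A's for-loop: three mutually exclusive counter increments
def pvStep (sa : PySem.Dict String Int) (comment : String) : PySem.Dict String Int :=
  let commentLower := PySem.Str.lower comment
  let hasPositive := pvPositiveWords.any (fun w => PySem.Str.isIn w commentLower)
  let hasNegative := pvNegativeWords.any (fun w => PySem.Str.isIn w commentLower)
  if hasPositive && !hasNegative then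
    sa.insert "positive" (sa.getD "positive" 0 + 1)
  else if hasNegative && !hasPositive then
    sa.insert "negative" (sa.getD "negative" 0 + 1)
  else
    sa.insert "neutral" (sa.getD "neutral" 0 + 1)

-- the sentiment_analysis dict with the four counters (A initialises it with 0,0,0,len)
def pvMk4 (p n u t : Int) : PySem.Dict String Int :=
  ((((PySem.Dict.empty.insert "positive" p).insert "negative" n).insert
      "neutral" u).insert "total" t)

-- port of A: initialise the dict, run the loop, return the dict
def analyze_comments (comments : List String) : List (String × Int) :=
  (comments.foldl pvStep (pvMk4 0 0 0 (comments.length : Int))).items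

-- ===== PORT B =====
-- B's _classify: the 'for i in range(len(text))' scan, done as structural
-- recursion over the suffixes of the text (text.startswith(w, i) is a prefix
-- test on the i-th suffix); early return 'neutral' once both flags are set.
def pvClassifyLoop : List Char → Bool → Bool → String
  | [], pos, neg =>
    if pos then "positive" else if neg then "negative" else "neutral"
  | c :: rest, pos, neg =>
    let s := c :: rest
    let pos := pos || pvPositiveWords.any (fun w => w.toList.isPrefixOf s)
    let neg := neg || pvNegativeWords.any (fun w => w.toList.isPrefixOf s)
    if pos && neg then "neutral" else pvClassifyLoop rest pos neg

def pvClassify (text : String) : String :=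
  pvClassifyLoop text.toList false false

-- port of B: a counter dict indexed by each comment's label, then 'total'
def analyze_comments_alt (comments : List String) : List (String × Int) :=
  let counts := comments.foldl
    (fun d comment =>
      let lab := pvClassify (PySem.Str.lower comment)
      d.insert lab (d.getD lab 0 + 1))
    (((PySem.Dict.empty.insert "positive" 0).insert "negative" 0).insert "neutral" 0)
  (counts.insert "total" (comments.length : Int)).items

-- ===== PRECONDITION & SPEC =====
def Spec_analyze_comments (comments : List String) (out : List (String × Int)) : Prop := out = analyze_comments_alt comments
instance (comments : List String) (out : List (String × Int)) : Decidable (Spec_analyze_comments comments out) := by unfold Spec_analyze_comments; infer_instance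

-- ===== CLAIM (what is proved, stated in full; the proofs are below) =====
def Claim_equal_analyze_comments : Prop := ∀ (comments : List String), Dom_analyze_comments comments → Spec_analyze_comments comments (analyze_comments comments)

-- ===== LEMMAS AND PROOFS =====

-- Bool: some word of ws is an infix of s
def pvAnyIn (ws : List String) (s : List Char) : Bool :=
  ws.any (fun w => PySem.Chars.isIn w.toList s)

lemma pvOrOr (a b x y : Bool) : ((a || x) || (b || y)) = ((a || b) || (x || y)) := by
  cases a <;> cases b <;> cases x <;> cases y <;> rfl

lemma pvIsIn_cons (sub : List Char) (c : Char) (rest : List Char) :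
    PySem.Chars.isIn sub (c :: rest) =
      (sub.isPrefixOf (c :: rest) || PySem.Chars.isIn sub rest) := by
  by_cases h : sub <:+: (c :: rest)
  · rw [(PySem.Chars.isIn_iff_infix _ _).2 h]
    rcases List.infix_cons_iff.1 h with h' | h'
    · simp [List.isPrefixOf_iff_prefix, h']
    · simp [(PySem.Chars.isIn_iff_infix _ _).2 h']
  · have hfull := (PySem.Chars.isIn_eq_false_iff _ _).2 h
    rw [List.infix_cons_iff, not_or] at h
    rw [hfull, (PySem.Chars.isIn_eq_false_iff _ _).2 h.2, Bool.or_false]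
    exact (Bool.eq_false_iff.2 (fun hh => h.1 (List.isPrefixOf_iff_prefix.mp hh))).symm

lemma pvAnyIn_cons (ws : List String) (c : Char) (rest : List Char) :
    pvAnyIn ws (c :: rest) =
      (ws.any (fun w => w.toList.isPrefixOf (c :: rest)) || pvAnyIn ws rest) := by
  induction ws with
  | nil => rfl
  | cons w ws ih =>
    simp only [pvAnyIn, List.any_cons] at *
    rw [pvIsIn_cons, ih, pvOrOr]

-- the scan loop computes exactly the two \'any infix\' flags (the loop never
-- runs with both flags already set: Python returns \'neutral\' the moment both hold)
lemma pvClassifyLoop_eq (s : List Char) (pos neg : Bool) (hpn : (pos && neg) = false) :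
    pvClassifyLoop s pos neg =
      (if (pos || pvAnyIn pvPositiveWords s) && (neg || pvAnyIn pvNegativeWords s) then "neutral"
       else if pos || pvAnyIn pvPositiveWords s then "positive"
       else if neg || pvAnyIn pvNegativeWords s then "negative" else "neutral") := by
  induction s generalizing pos neg with
  | nil =>
    have hp : pvAnyIn pvPositiveWords [] = false := by decide
    have hn : pvAnyIn pvNegativeWords [] = false := by decide
    simp only [hp, hn, Bool.or_false]
    cases pos <;> cases neg <;> simp_all [pvClassifyLoop]
  | cons c rest ih =>
    simp only [pvClassifyLoop, pvAnyIn_cons]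
    set ap := pvPositiveWords.any (fun w => w.toList.isPrefixOf (c :: rest)) with hap
    set an := pvNegativeWords.any (fun w => w.toList.isPrefixOf (c :: rest)) with han
    by_cases h : ((pos || ap) && (neg || an)) = true
    · rw [if_pos h]
      rw [Bool.and_eq_true] at h
      have h1 : (pos || (ap || pvAnyIn pvPositiveWords rest)) = true := by
        rw [← Bool.or_assoc, h.1, Bool.true_or]
      have h2 : (neg || (an || pvAnyIn pvNegativeWords rest)) = true := by
        rw [← Bool.or_assoc, h.2, Bool.true_or]
      rw [h1, h2]
      rfl
    · rw [if_neg h]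
      rw [Bool.not_eq_true] at h
      rw [ih _ _ h]
      simp only [Bool.or_assoc]

-- so B's per-comment label is determined by A's two membership flags
def pvHasP (comment : String) : Bool :=
  pvPositiveWords.any (fun w => PySem.Str.isIn w (PySem.Str.lower comment))

def pvHasN (comment : String) : Bool :=
  pvNegativeWords.any (fun w => PySem.Str.isIn w (PySem.Str.lower comment))

lemma pvClassify_eq (comment : String) :
    pvClassify (PySem.Str.lower comment) =
      (if pvHasP comment && !pvHasN comment then "positive"
       else if pvHasN comment && !pvHasP comment then "negative" else "neutral") := by
  have hP : pvAnyIn pvPositiveWords (PySem.Str.lower comment).toList = pvHasP comment := by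
    simp [pvAnyIn, pvHasP]
  have hN : pvAnyIn pvNegativeWords (PySem.Str.lower comment).toList = pvHasN comment := by
    simp [pvAnyIn, pvHasN]
  rw [pvClassify, pvClassifyLoop_eq _ _ _ rfl]
  simp only [Bool.false_or, hP, hN]
  cases hp : pvHasP comment <;> cases hn : pvHasN comment <;> rfl

def pvP (c : String) : Bool := pvHasP c && !pvHasN c
def pvN (c : String) : Bool := pvHasN c && !pvHasP c

lemma pvStep_mk4 (p n u t : Int) (c : String) :
    pvStep (pvMk4 p n u t) c =
      if pvP c then pvMk4 (p + 1) n u t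
      else if pvN c then pvMk4 p (n + 1) u t
      else pvMk4 p n (u + 1) t := by
  simp only [pvStep, pvP, pvN, pvHasP, pvHasN, pvMk4]
  split_ifs <;> simp_all [PySem.Dict.empty, PySem.Dict.insert, PySem.Dict.getD, PySem.Dict.get?]

lemma pvP_not_pvN (c : String) (h : pvP c = true) : pvN c = false := by
  simp only [pvP, Bool.and_eq_true, Bool.not_eq_eq_eq_not, Bool.not_true] at h
  simp [pvN, h.2]

def pvMk3 (p n u : Int) : PySem.Dict String Int :=
  (((PySem.Dict.empty.insert "positive" p).insert "negative" n).insert "neutral" u)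

lemma pvMk4_congr {p n u t p' n' u' : Int} (h1 : p = p') (h2 : n = n') (h3 : u = u') :
    pvMk4 p n u t = pvMk4 p' n' u' t := by rw [h1, h2, h3]

lemma pvMk3_congr {p n u p' n' u' : Int} (h1 : p = p') (h2 : n = n') (h3 : u = u') :
    pvMk3 p n u = pvMk3 p' n' u' := by rw [h1, h2, h3]

-- A's loop: explicit closed form of the four counters
lemma pvLoopA (l : List String) (p n u t : Int) :
    l.foldl pvStep (pvMk4 p n u t) =
      pvMk4 (p + (l.map (fun c => if pvP c then (1 : Int) else 0)).sum)
            (n + (l.map (fun c => if pvN c then (1 : Int) else 0)).sum)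
            (u + (l.map (fun c => if !pvP c && !pvN c then (1 : Int) else 0)).sum)
            t := by
  induction l generalizing p n u with
  | nil => simp
  | cons c l ih =>
    rw [List.foldl_cons, pvStep_mk4]
    simp only [List.map_cons, List.sum_cons]
    cases hp : pvP c with
    | true =>
      have hn : pvN c = false := pvP_not_pvN c hp
      rw [if_pos rfl, ih]
      refine pvMk4_congr ?_ ?_ ?_ <;>
        · simp only [hn, if_true, Bool.false_eq_true, if_false, Bool.not_true,
            Bool.false_and]
          ring
    | false =>
      rw [if_neg (by simp)]
      cases hn : pvN c with
      | true =>
        rw [if_pos rfl, ih]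
        refine pvMk4_congr ?_ ?_ ?_ <;>
          · simp only [if_true, Bool.false_eq_true, if_false, Bool.not_true,
              Bool.and_false]
            ring
      | false =>
        rw [if_neg (by simp), ih]
        refine pvMk4_congr ?_ ?_ ?_ <;>
          · simp only [Bool.false_eq_true, if_false, Bool.not_false,
              Bool.and_self, if_true]
            ring

def pvBStep (d : PySem.Dict String Int) (comment : String) : PySem.Dict String Int :=
  let lab := pvClassify (PySem.Str.lower comment)
  d.insert lab (d.getD lab 0 + 1)

lemma pvBStep_mk3 (p n u : Int) (c : String) :
    pvBStep (pvMk3 p n u) c =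
      if pvP c then pvMk3 (p + 1) n u
      else if pvN c then pvMk3 p (n + 1) u
      else pvMk3 p n (u + 1) := by
  simp only [pvBStep, pvClassify_eq, pvP, pvN, pvMk3]
  split_ifs <;> simp_all [PySem.Dict.empty, PySem.Dict.insert, PySem.Dict.getD, PySem.Dict.get?]

-- B's loop: the same closed form on the three-counter dict
lemma pvLoopB (l : List String) (p n u : Int) :
    l.foldl pvBStep (pvMk3 p n u) =
      pvMk3 (p + (l.map (fun c => if pvP c then (1 : Int) else 0)).sum)
            (n + (l.map (fun c => if pvN c then (1 : Int) else 0)).sum)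
            (u + (l.map (fun c => if !pvP c && !pvN c then (1 : Int) else 0)).sum) := by
  induction l generalizing p n u with
  | nil => simp
  | cons c l ih =>
    rw [List.foldl_cons, pvBStep_mk3]
    simp only [List.map_cons, List.sum_cons]
    cases hp : pvP c with
    | true =>
      have hn : pvN c = false := pvP_not_pvN c hp
      rw [if_pos rfl, ih]
      refine pvMk3_congr ?_ ?_ ?_ <;>
        · simp only [hn, if_true, Bool.false_eq_true, if_false, Bool.not_true,
            Bool.false_and]
          ring
    | false =>
      rw [if_neg (by simp)]
      cases hn : pvN c with
      | true =>
        rw [if_pos rfl, ih]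
        refine pvMk3_congr ?_ ?_ ?_ <;>
          · simp only [if_true, Bool.false_eq_true, if_false, Bool.not_true,
              Bool.and_false]
            ring
      | false =>
        rw [if_neg (by simp), ih]
        refine pvMk3_congr ?_ ?_ ?_ <;>
          · simp only [Bool.false_eq_true, if_false, Bool.not_false,
              Bool.and_self, if_true]
            ring

-- ===== VERDICT (by name: the statement is the Claim_ definition above) =====
theorem analyze_comments_spec : Claim_equal_analyze_comments := by
  intro comments _
  show analyze_comments comments = analyze_comments_alt comments
  unfold analyze_comments analyze_comments_alt
  show (comments.foldl pvStep (pvMk4 0 0 0 (comments.length : Int))).items =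
    ((comments.foldl pvBStep (pvMk3 0 0 0)).insert "total" (comments.length : Int)).items
  rw [pvLoopA, pvLoopB]
  simp [pvMk4, pvMk3, PySem.Dict.empty, PySem.Dict.insert]
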